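-- pv_equiv track=rewrite | github.com/ak-maker/lnm | automation_for_markdown/automation/markdown_divider_for_parallel_script.py | generate_captions_for_file
-- ===== SOURCE A (Python) =====
-- def generate_captions_for_file(content, toc_headings, hierarchy_headings):
--     # Find all headings in the file content
--     # pattern = re.compile('[^-#a-zA-Z0-9"\n ]')
--     headings_in_file = [line.split('<a class="headerlink" href="')[0] + '\n' for line in content if line.split('<a class="headerlink" href="')[0] in hierarchy_headings]
--     # Generate captions based on the hierarchy
--     if len(headings_in_file) >=2 and headings_in_file[1].startswith('### '):
--         index = hierarchy_headings.index(headings_in_file[1].rstrip('\n'))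
--         for i in range(index - 1, -1, -1):
--             if hierarchy_headings[i].startswith('## '):
--                 headings_in_file.insert(1, (hierarchy_headings[i]+'\n'))
--                 break
--     elif len(headings_in_file) >=2 and headings_in_file[1].startswith('#### '): ## 这里不对。tutorials_for_experts_MIMO OFDM Transmissions over the CDL Channel Model
--         index = hierarchy_headings.index(headings_in_file[1].rstrip('\n'))
--         for i in range(index - 1, -1, -1):
--             if hierarchy_headings[i].startswith('### '):
--                 headings_in_file.insert(1, (hierarchy_headings[i]+'\n'))
--                 for j in range(i-1, -1, -1):
--                     if hierarchy_headings[j].startswith('## '):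
--                         headings_in_file.insert(1, (hierarchy_headings[j]+'\n'))
--                         break
--                 break
--     # captions = ""
--     # for heading in headings_in_file:
--     #     if heading not in captions:
--     #         captions = captions + heading
--     return headings_in_file
-- ===== SOURCE B (Python) =====
-- def generate_captions_for_file(content, toc_headings, hierarchy_headings):
--     marker = '<a class="headerlink" href="'
--     headings_in_file = [line.split(marker)[0] + '\n' for line in content
--                         if line.split(marker)[0] in hierarchy_headings]
--     if len(headings_in_file) < 2:
--         return headings_in_file
--     second = headings_in_file[1]
--     if second.startswith('#### '):
--         want_h3 = True
--     elif second.startswith('### '):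
--         want_h3 = False
--     else:
--         return headings_in_file
--     target = second.rstrip('\n')
--     # One forward pass: remember the latest '## ', and the latest '### ' together
--     # with the '## ' that was current when it appeared; stop at the target.
--     last_h2 = None
--     last_h3 = None  # (h3_text, h2_current_at_that_time)
--     ancestors = []
--     for h in hierarchy_headings:
--         if h == target:
--             if want_h3:
--                 if last_h3 is not None:
--                     h3, h2 = last_h3
--                     ancestors = ([h2] if h2 is not None else []) + [h3]
--             elif last_h2 is not None:
--                 ancestors = [last_h2]
--             break
--         if h.startswith('## '):
--             last_h2 = h
--         elif h.startswith('### '):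
--             last_h3 = (h, last_h2)
--     return headings_in_file[:1] + [a + '\n' for a in ancestors] + headings_in_file[1:]
-- ===== Notes on version B (the rewrite author's own statement) =====
-- stated objective: alternative
-- what changed: Replaces A's hierarchy_headings.index lookup followed by backward scans (a nested one in the '#### ' case) with a single forward pass that maintains the most recent '## ' and the most recent '### ' paired with the '## ' current at that time, stopping at the first occurrence of the target heading, then splices the collected ancestors in one step instead of repeated list.insert calls.
import Mathlib
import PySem

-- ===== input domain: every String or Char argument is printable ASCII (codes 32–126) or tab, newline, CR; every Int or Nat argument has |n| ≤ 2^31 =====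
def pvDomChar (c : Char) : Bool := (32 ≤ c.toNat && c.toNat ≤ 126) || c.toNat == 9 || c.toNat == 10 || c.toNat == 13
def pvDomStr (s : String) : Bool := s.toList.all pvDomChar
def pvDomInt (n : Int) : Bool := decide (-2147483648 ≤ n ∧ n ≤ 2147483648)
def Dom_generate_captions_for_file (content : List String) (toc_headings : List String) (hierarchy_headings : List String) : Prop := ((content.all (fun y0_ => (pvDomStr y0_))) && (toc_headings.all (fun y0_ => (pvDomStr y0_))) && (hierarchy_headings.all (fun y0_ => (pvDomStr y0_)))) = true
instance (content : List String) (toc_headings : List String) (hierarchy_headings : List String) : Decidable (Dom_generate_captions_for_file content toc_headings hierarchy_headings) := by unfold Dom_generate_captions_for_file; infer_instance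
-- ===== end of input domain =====

-- B replaces A's .index lookup plus (nested) backward scans by a single forward pass over
-- hierarchy_headings that remembers the current '## ' and '### ' ancestors (objective: alternative).

-- ===== PORT A =====
-- shared by both ports (both Pythons build headings_in_file with the identical comprehension)
def pvMarker : String := "<a class=\"headerlink\" href=\""

-- line.split(marker)[0]: marker ≠ "" so split? is some and the list is nonempty
def pvPart (line : String) : String := ((PySem.Str.split? line pvMarker).getD []).headD ""

def pvHeadingsInFile (content hierarchy : List String) : List String :=
  (content.filter (fun l => decide (pvPart l ∈ hierarchy))).map (fun l => pvPart l ++ "\n")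

-- exact port of s.rstrip('\n'): drop the trailing run of '\n' characters
def pvRstripNl (s : String) : String :=
  String.ofList ((s.toList.reverse.dropWhile (fun c => c = '\n')).reverse)

-- 'for i in range(n - 1, -1, -1): if p(hs[i]): <use i>; break' — first hit scanning backward
-- (hs[i] rendered as getD: every i produced is a valid non-negative index, so it is exact)
def pvBack (hs : List String) (p : String → Bool) : Nat → Option Nat
  | 0 => none
  | n + 1 => if p (hs.getD n "") then some n else pvBack hs p n

def generate_captions_for_file (content : List String) (toc_headings : List String) (hierarchy_headings : List String) : List String :=
  let headings := pvHeadingsInFile content hierarchy_headings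
  if 2 ≤ headings.length ∧ PySem.Str.startswith (headings.getD 1 "") "### " then
    match PySem.List.index? hierarchy_headings (pvRstripNl (headings.getD 1 "")) with
    | none => headings      -- Python raises ValueError here; excluded by Pre_
    | some idx =>
      match pvBack hierarchy_headings (fun h => PySem.Str.startswith h "## ") idx with
      | none => headings
      | some i => PySem.List.insert headings 1 (hierarchy_headings.getD i "" ++ "\n")
  else if 2 ≤ headings.length ∧ PySem.Str.startswith (headings.getD 1 "") "#### " then
    match PySem.List.index? hierarchy_headings (pvRstripNl (headings.getD 1 "")) with
    | none => headings      -- Python raises ValueError here; excluded by Pre_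
    | some idx =>
      match pvBack hierarchy_headings (fun h => PySem.Str.startswith h "### ") idx with
      | none => headings
      | some i =>
        let headings' := PySem.List.insert headings 1 (hierarchy_headings.getD i "" ++ "\n")
        match pvBack hierarchy_headings (fun h => PySem.Str.startswith h "## ") i with
        | none => headings'
        | some j => PySem.List.insert headings' 1 (hierarchy_headings.getD j "" ++ "\n")
  else headings

-- ===== PORT B =====
-- loop state: (last_h2, last_h3 as (h3, h2-current-when-h3-was-seen))
def pvScanStep (st : Option String × Option (String × Option String)) (h : String) :
    Option String × Option (String × Option String) :=
  if PySem.Str.startswith h "## " then (some h, st.2)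
  else if PySem.Str.startswith h "### " then (st.1, some (h, st.1))
  else st

-- the forward pass with break: returns the ancestor list
def pvScan (target : String) (wantH3 : Bool) :
    List String → (Option String × Option (String × Option String)) → List String
  | [], _ => []
  | h :: rest, st =>
    if h = target then
      if wantH3 then
        match st.2 with
        | some (h3, some h2) => [h2, h3]
        | some (h3, none) => [h3]
        | none => []
      else
        match st.1 with
        | some h2 => [h2]
        | none => []
    else pvScan target wantH3 rest (pvScanStep st h)

def generate_captions_for_file_alt (content : List String) (toc_headings : List String) (hierarchy_headings : List String) : List String :=
  let headings := pvHeadingsInFile content hierarchy_headings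
  if headings.length < 2 then headings
  else
    let second := headings.getD 1 ""
    if PySem.Str.startswith second "#### " then
      let ancestors := pvScan (pvRstripNl second) true hierarchy_headings (none, none)
      headings.take 1 ++ ancestors.map (· ++ "\n") ++ headings.drop 1
    else if PySem.Str.startswith second "### " then
      let ancestors := pvScan (pvRstripNl second) false hierarchy_headings (none, none)
      headings.take 1 ++ ancestors.map (· ++ "\n") ++ headings.drop 1
    else headings

-- ===== PRECONDITION & SPEC =====
-- Pre_ excludes inputs where some '### '/'#### ' hierarchy heading ends with a newline:
-- there A's .index lookup of the rstripped second heading can raise ValueError.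
def Pre_generate_captions_for_file (content : List String) (toc_headings : List String) (hierarchy_headings : List String) : Prop :=
  ∀ h ∈ hierarchy_headings,
    (PySem.Str.startswith h "### " = true ∨ PySem.Str.startswith h "#### " = true) →
    PySem.Str.endswith h "\n" = false

instance (content : List String) (toc_headings : List String) (hierarchy_headings : List String) : Decidable (Pre_generate_captions_for_file content toc_headings hierarchy_headings) := by unfold Pre_generate_captions_for_file; infer_instance

def pvWitness_generate_captions_for_file : List String × List String × List String :=
  (["## A", "### x"], [], ["## A", "### x"])

def Spec_generate_captions_for_file (content : List String) (toc_headings : List String) (hierarchy_headings : List String) (out : List String) : Prop := out = generate_captions_for_file_alt content toc_headings hierarchy_headings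
instance (content : List String) (toc_headings : List String) (hierarchy_headings : List String) (out : List String) : Decidable (Spec_generate_captions_for_file content toc_headings hierarchy_headings out) := by unfold Spec_generate_captions_for_file; infer_instance

-- ===== CLAIM (what is proved, stated in full; the proofs are below) =====
def Claim_equal_generate_captions_for_file : Prop := ∀ (content : List String) (toc_headings : List String) (hierarchy_headings : List String), Dom_generate_captions_for_file content toc_headings hierarchy_headings → Pre_generate_captions_for_file content toc_headings hierarchy_headings → Spec_generate_captions_for_file content toc_headings hierarchy_headings (generate_captions_for_file content toc_headings hierarchy_headings)

-- ===== LEMMAS AND PROOFS =====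

-- the value pvScan returns once it reaches the target, as a function of the state
def pvFinish (wantH3 : Bool) (st : Option String × Option (String × Option String)) : List String :=
  if wantH3 then
    match st.2 with
    | some (h3, some h2) => [h2, h3]
    | some (h3, none) => [h3]
    | none => []
  else
    match st.1 with
    | some h2 => [h2]
    | none => []

lemma pvScan_run (target : String) (w : Bool) (suf : List String) :
    ∀ (l : List String) (st : Option String × Option (String × Option String)),
      target ∉ l →
      pvScan target w (l ++ target :: suf) st = pvFinish w (l.foldl pvScanStep st) := by
  intro l
  induction l with
  | nil => intro st _; simp [pvScan, pvFinish]
  | cons h rest ih =>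
    intro st hmem
    have hne : h ≠ target := by
      intro he; exact hmem (by simp [he])
    simp only [List.cons_append, pvScan, if_neg hne, List.foldl_cons]
    exact ih _ (fun hm => hmem (List.mem_cons_of_mem _ hm))

lemma h2_not_h3 (h : String) (h2 : PySem.Str.startswith h "## " = true) :
    PySem.Str.startswith h "### " = false := by
  simp only [PySem.Str.startswith_eq, PySem.Chars.startswith_iff] at h2
  rw [Bool.eq_false_iff, ne_eq, PySem.Str.startswith_eq, PySem.Chars.startswith_iff]
  intro h3
  obtain ⟨t, ht⟩ := h2
  obtain ⟨u, hu⟩ := h3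
  rw [← ht] at hu
  have e1 : ("## ").toList = ['#', '#', ' '] := rfl
  have e2 : ("### ").toList = ['#', '#', '#', ' '] := rfl
  rw [e1, e2] at hu
  simp [List.cons.injEq] at hu

lemma h3_not_h4 (h : String) (h3 : PySem.Str.startswith h "### " = true) :
    PySem.Str.startswith h "#### " = false := by
  simp only [PySem.Str.startswith_eq, PySem.Chars.startswith_iff] at h3
  rw [Bool.eq_false_iff, ne_eq, PySem.Str.startswith_eq, PySem.Chars.startswith_iff]
  intro h4
  obtain ⟨t, ht⟩ := h3
  obtain ⟨u, hu⟩ := h4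
  rw [← ht] at hu
  have e1 : ("### ").toList = ['#', '#', '#', ' '] := rfl
  have e2 : ("#### ").toList = ['#', '#', '#', '#', ' '] := rfl
  rw [e1, e2] at hu
  simp [List.cons.injEq] at hu

lemma getD_mid (l : List String) (x : String) (t : List String) :
    (l ++ x :: t).getD l.length "" = x := by
  simp [List.getD_eq_getElem?_getD]

lemma pvRstrip_append (p : String) (hp : PySem.Str.endswith p "\n" = false) :
    pvRstripNl (p ++ "\n") = p := by
  simp only [PySem.Str.endswith_eq, Bool.eq_false_iff, ne_eq, PySem.Chars.endswith_iff] at hp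
  unfold pvRstripNl
  rw [String.toList_append]
  have e1 : ("\n").toList = ['\n'] := rfl
  rw [e1, List.reverse_append, List.reverse_cons, List.reverse_nil, List.nil_append,
    List.singleton_append, List.dropWhile_cons_of_pos (by simp)]
  cases hrev : p.toList.reverse with
  | nil =>
    have hnil : p.toList = [] := by simpa using congrArg List.reverse hrev
    simp only [List.dropWhile_nil, List.reverse_nil]
    conv_rhs => rw [← @String.ofList_toList p, hnil]
  | cons c cs =>
    have hc : ¬ (c = '\n') := by
      intro hc
      apply hp
      refine ⟨cs.reverse, ?_⟩
      have := congrArg List.reverse hrev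
      simpa [hc] using this.symm
    rw [List.dropWhile_cons_of_neg (by simpa using hc), ← hrev, List.reverse_reverse,
      String.ofList_toList]

lemma mem_headings {x : String} {content hierarchy : List String}
    (hx : x ∈ pvHeadingsInFile content hierarchy) :
    ∃ q ∈ hierarchy, x = q ++ "\n" := by
  unfold pvHeadingsInFile at hx
  rcases List.mem_map.mp hx with ⟨l, hl, rfl⟩
  rcases List.mem_filter.mp hl with ⟨-, hmem⟩
  exact ⟨pvPart l, of_decide_eq_true hmem, rfl⟩

-- a prefix without newline of q ++ "\n" is a prefix of q
lemma startswith_append_nl (q p : String) (hp : '\n' ∉ p.toList)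
    (h : PySem.Str.startswith (q ++ "\n") p = true) :
    PySem.Str.startswith q p = true := by
  simp only [PySem.Str.startswith_eq, PySem.Chars.startswith_iff, String.toList_append] at h ⊢
  obtain ⟨t, ht⟩ := h
  have e1 : ("\n").toList = ['\n'] := rfl
  rw [e1] at ht
  induction t using List.reverseRecOn with
  | nil =>
    exfalso
    apply hp
    rw [List.append_nil] at ht
    rw [ht]
    simp
  | append_singleton t' c _ =>
    rw [← List.append_assoc] at ht
    exact ⟨t', (List.append_inj' ht (by simp)).1⟩

-- the main invariant: the forward-pass state over l agrees with A's backward scans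
-- over the same full list l ++ t at position l.length
lemma back_state (t : List String) (l : List String) :
    (l.foldl pvScanStep (none, none)).1
      = (pvBack (l ++ t) (fun h => PySem.Str.startswith h "## ") l.length).map
          (fun i => (l ++ t).getD i "")
    ∧ (((l.foldl pvScanStep (none, none)).2 = none
          ∧ pvBack (l ++ t) (fun h => PySem.Str.startswith h "### ") l.length = none)
        ∨ (∃ i, pvBack (l ++ t) (fun h => PySem.Str.startswith h "### ") l.length = some i
            ∧ (l.foldl pvScanStep (none, none)).2
                = some ((l ++ t).getD i "",
                    (pvBack (l ++ t) (fun h => PySem.Str.startswith h "## ") i).map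
                      (fun j => (l ++ t).getD j "")))) := by
  induction l using List.reverseRecOn generalizing t with
  | nil => exact ⟨rfl, Or.inl ⟨rfl, rfl⟩⟩
  | append_singleton l x ih =>
    have hfold : ((l ++ [x]).foldl pvScanStep (none, none))
        = pvScanStep (l.foldl pvScanStep (none, none)) x := by
      rw [List.foldl_append]; rfl
    have hassoc : (l ++ [x]) ++ t = l ++ (x :: t) := by simp
    have hlen : (l ++ [x]).length = l.length + 1 := by simp
    have hmid : (l ++ x :: t).getD l.length "" = x := getD_mid l x t
    have hstep : ∀ p : String → Bool,
        pvBack (l ++ x :: t) p (l.length + 1)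
          = if p x then some l.length else pvBack (l ++ x :: t) p l.length := by
      intro p; simp [pvBack]
    obtain ⟨ih1, ih2⟩ := ih (x :: t)
    rw [hfold, hassoc, hlen]
    by_cases hx2 : PySem.Str.startswith x "## "
    · have hx3 : PySem.Str.startswith x "### " = false := h2_not_h3 x hx2
      constructor
      · rw [hstep, if_pos hx2, Option.map_some, hmid]
        simp only [pvScanStep, hx2, reduceIte]
      · rw [hstep, if_neg (by simp only [hx3, Bool.false_eq_true, not_false_eq_true])]
        rcases ih2 with ⟨h1, h2⟩ | ⟨i, hi, hst⟩
        · refine Or.inl ⟨?_, h2⟩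
          simp only [pvScanStep, hx2, reduceIte]
          exact h1
        · refine Or.inr ⟨i, hi, ?_⟩
          simp only [pvScanStep, hx2, reduceIte]
          exact hst
    · have hx2' : PySem.Str.startswith x "## " = false := Bool.eq_false_iff.mpr hx2
      by_cases hx3 : PySem.Str.startswith x "### "
      · constructor
        · rw [hstep, if_neg (by simp only [hx2', Bool.false_eq_true, not_false_eq_true])]
          simp only [pvScanStep, hx2', hx3, Bool.false_eq_true, reduceIte]
          exact ih1
        · refine Or.inr ⟨l.length, ?_, ?_⟩
          · rw [hstep]
            simp only [hx3, reduceIte]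
          · rw [hmid]
            simp only [pvScanStep, hx2', hx3, Bool.false_eq_true, reduceIte]
            rw [ih1]
      · have hx3' : PySem.Str.startswith x "### " = false := Bool.eq_false_iff.mpr hx3
        constructor
        · rw [hstep, if_neg (by simp only [hx2', Bool.false_eq_true, not_false_eq_true])]
          simp only [pvScanStep, hx2', hx3', Bool.false_eq_true, reduceIte]
          exact ih1
        · rw [hstep, if_neg (by simp only [hx3', Bool.false_eq_true, not_false_eq_true])]
          rcases ih2 with ⟨h1, h2⟩ | ⟨i, hi, hst⟩
          · refine Or.inl ⟨?_, h2⟩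
            simp only [pvScanStep, hx2', hx3', Bool.false_eq_true, reduceIte]
            exact h1
          · refine Or.inr ⟨i, hi, ?_⟩
            simp only [pvScanStep, hx2', hx3', Bool.false_eq_true, reduceIte]
            exact hst

lemma insert_one_cons_cons (a b v : String) (rest : List String) :
    PySem.List.insert (a :: b :: rest) 1 v = a :: v :: b :: rest := by
  rw [PySem.List.insert_ofNat _ 1 _ (by simp)]
  simp

-- ===== VERDICT (by name: the statement is the Claim_ definition above) =====
theorem generate_captions_for_file_spec : Claim_equal_generate_captions_for_file := by
  intro content toc_headings hh _ hpre
  show generate_captions_for_file content toc_headings hh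
      = generate_captions_for_file_alt content toc_headings hh
  simp only [generate_captions_for_file, generate_captions_for_file_alt]
  cases hH : pvHeadingsInFile content hh with
  | nil => simp
  | cons a tl =>
    cases tl with
    | nil => simp
    | cons b rest =>
      have hb : (a :: b :: rest).getD 1 "" = b := rfl
      have hbmem : b ∈ pvHeadingsInFile content hh := by
        rw [hH]; exact List.mem_cons_of_mem _ (List.mem_cons_self ..)
      obtain ⟨q, hqmem, hbq⟩ := mem_headings hbmem
      have hlen2 : 2 ≤ (a :: b :: rest).length := by simp
      have hnlt : ¬ ((a :: b :: rest).length < 2) := by simp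
      rw [hb]
      by_cases h3 : PySem.Str.startswith b "### "
      · have h4 : PySem.Str.startswith b "#### " = false := h3_not_h4 b h3
        have hq3 : PySem.Str.startswith q "### " = true :=
          startswith_append_nl q "### " (by decide) (by rw [← hbq]; exact h3)
        have hkey : pvRstripNl b = q := by
          rw [hbq]; exact pvRstrip_append q (hpre q hqmem (Or.inl hq3))
        obtain ⟨k, hk⟩ := Option.isSome_iff_exists.mp
          ((PySem.List.index?_isSome_iff hh q).mpr hqmem)
        obtain ⟨pre, suf, hsplit, hlenpre, hnot⟩ :=
          (PySem.List.index?_eq_some_iff hh q k).mp hk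
        subst hsplit
        obtain ⟨bs1, bs2⟩ := back_state (q :: suf) pre
        rw [if_pos ⟨hlen2, h3⟩, if_neg hnlt,
          if_neg (by simp only [h4, Bool.false_eq_true, not_false_eq_true]), if_pos h3,
          hkey, hk, ← hlenpre, pvScan_run q false suf pre (none, none) hnot]
        cases hcase : pvBack (pre ++ q :: suf) (fun h => PySem.Str.startswith h "## ")
            pre.length with
        | none =>
          rw [hcase] at bs1
          simp only [Option.map_none] at bs1
          simp only [PySem.Str.startswith_eq, String.reduceToList] at hcase
          simp [pvFinish, hcase, bs1]
        | some i =>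
          rw [hcase] at bs1
          simp only [Option.map_some] at bs1
          simp only [PySem.Str.startswith_eq, String.reduceToList] at hcase
          simp [pvFinish, hcase, bs1, insert_one_cons_cons]
      · by_cases h4 : PySem.Str.startswith b "#### "
        · have hq4 : PySem.Str.startswith q "#### " = true :=
            startswith_append_nl q "#### " (by decide) (by rw [← hbq]; exact h4)
          have hkey : pvRstripNl b = q := by
            rw [hbq]; exact pvRstrip_append q (hpre q hqmem (Or.inr hq4))
          obtain ⟨k, hk⟩ := Option.isSome_iff_exists.mp
            ((PySem.List.index?_isSome_iff hh q).mpr hqmem)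
          obtain ⟨pre, suf, hsplit, hlenpre, hnot⟩ :=
            (PySem.List.index?_eq_some_iff hh q k).mp hk
          subst hsplit
          obtain ⟨bs1, bs2⟩ := back_state (q :: suf) pre
          rw [if_neg (by rintro ⟨-, hc⟩; exact h3 hc), if_pos ⟨hlen2, h4⟩, if_neg hnlt,
            if_pos h4, hkey, hk, ← hlenpre, pvScan_run q true suf pre (none, none) hnot]
          rcases bs2 with ⟨hst2, hback3⟩ | ⟨i, hi, hst2⟩
          · simp only [PySem.Str.startswith_eq, String.reduceToList] at hback3
            simp [pvFinish, hback3, hst2]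
          · cases hcase : pvBack (pre ++ q :: suf) (fun h => PySem.Str.startswith h "## ")
                i with
            | none =>
              rw [hcase] at hst2
              simp only [Option.map_none] at hst2
              simp only [PySem.Str.startswith_eq, String.reduceToList] at hcase hi
              simp [pvFinish, hi, hcase, hst2, insert_one_cons_cons]
            | some j =>
              rw [hcase] at hst2
              simp only [Option.map_some] at hst2
              simp only [PySem.Str.startswith_eq, String.reduceToList] at hcase hi
              simp [pvFinish, hi, hcase, hst2, insert_one_cons_cons]
        · rw [if_neg (by rintro ⟨-, hc⟩; exact h3 hc),
            if_neg (by rintro ⟨-, hc⟩; exact h4 hc), if_neg hnlt,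
            if_neg (by simp only [Bool.eq_false_iff.mpr h4, Bool.false_eq_true,
              not_false_eq_true]),
            if_neg (by simp only [Bool.eq_false_iff.mpr h3, Bool.false_eq_true,
              not_false_eq_true])]
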